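-- pv_equiv track=rewrite | github.com/anight/adventofcode | 2015/day05/run.py | has_non_overlapping_pairs
-- ===== SOURCE A (Python) =====
-- from collections import Counter, defaultdict
--
-- def has_non_overlapping_pairs(string):
-- 	c = defaultdict(int)
-- 	last_pair = None
-- 	for pair in zip(string, string[1:]):
-- 		if last_pair == pair:
-- 			last_pair = None
-- 			continue
-- 		c[pair] += 1
-- 		last_pair = pair
-- 	return any( v > 1 for v in c.values() )
-- ===== SOURCE B (Python) =====
-- def has_non_overlapping_pairs(string):
-- 	for i in range(len(string) - 1):
-- 		if string[i:i+2] in string[i+2:]: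
-- 			return True
-- 	return False
-- ===== Notes on version B (the rewrite author's own statement) =====
-- stated objective: simpler
-- what changed: Replaces the single-pass defaultdict counter with a last-pair sentinel by a direct scan that asks, for each position i, whether the two-character pair string[i:i+2] occurs again in the suffix string[i+2:], returning on the first hit.
import Mathlib
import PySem

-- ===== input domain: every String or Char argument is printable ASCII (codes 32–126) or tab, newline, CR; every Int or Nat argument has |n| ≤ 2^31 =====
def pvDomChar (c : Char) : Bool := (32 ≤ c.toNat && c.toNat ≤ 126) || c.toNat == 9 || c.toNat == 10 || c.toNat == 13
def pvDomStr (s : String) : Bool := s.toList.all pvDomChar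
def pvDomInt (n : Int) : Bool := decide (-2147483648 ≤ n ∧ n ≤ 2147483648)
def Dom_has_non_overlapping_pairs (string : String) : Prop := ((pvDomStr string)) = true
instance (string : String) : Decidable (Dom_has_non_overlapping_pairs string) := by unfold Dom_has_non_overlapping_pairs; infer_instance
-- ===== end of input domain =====

-- B replaces A's single-pass defaultdict-with-sentinel counting by the direct quadratic scan
-- "does the pair at i occur again from i+2 on"; objective: simpler (no table, no sentinel state).

-- ===== PORT A =====
-- the for-loop over zip(string, string[1:]) with state (c, last_pair)
def pvLoopA : List (Char × Char) → PySem.Dict (Char × Char) Int → Option (Char × Char) → PySem.Dict (Char × Char) Int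
  | [], c, _ => c
  | p :: rest, c, last =>
    if last = some p then pvLoopA rest c none
    else pvLoopA rest (c.insert p (c.getD p 0 + 1)) (some p)   -- defaultdict(int): c[p] += 1

def has_non_overlapping_pairs (string : String) : Bool :=
  (pvLoopA (string.toList.zip (PySem.List.slice string.toList (some 1) none))
      PySem.Dict.empty none).values.any (fun v => 1 < v)

-- ===== PORT B =====
-- 'for i in range(len(string)-1): if string[i:i+2] in string[i+2:]: return True' as structural
-- recursion over the character list; the 2-character substring test s[i:i+2] in s[i+2:] is exact
-- as membership of the pair among the adjacent pairs of the suffix.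
def pvGoB : List Char → Bool
  | x :: y :: rest => (rest.zip rest.tail).contains (x, y) || pvGoB (y :: rest)
  | _ => false

def has_non_overlapping_pairs_alt (string : String) : Bool := pvGoB string.toList

-- ===== PRECONDITION & SPEC =====
def Spec_has_non_overlapping_pairs (string : String) (out : Bool) : Prop := out = has_non_overlapping_pairs_alt string
instance (string : String) (out : Bool) : Decidable (Spec_has_non_overlapping_pairs string out) := by unfold Spec_has_non_overlapping_pairs; infer_instance

-- ===== CLAIM (what is proved, stated in full; the proofs are below) =====
def Claim_equal_has_non_overlapping_pairs : Prop := ∀ (string : String), Dom_has_non_overlapping_pairs string → Spec_has_non_overlapping_pairs string (has_non_overlapping_pairs string)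

-- ===== LEMMAS AND PROOFS =====

-- how often A's loop increments the counter of q, as a pure function
def pvCount {α : Type} [DecidableEq α] : List α → Option α → α → Nat
  | [], _, _ => 0
  | p :: rest, last, q =>
    if last = some p then pvCount rest none q
    else (if p = q then 1 else 0) + pvCount rest (some p) q

-- B's test on the pair list: some element recurs at distance ≥ 2
def pvQ {α : Type} [BEq α] [LawfulBEq α] : List α → Bool
  | [] => false
  | p :: rest => (rest.drop 1).contains p || pvQ rest

lemma pvCount_nil {α : Type} [DecidableEq α] (last : Option α) (q : α) :
    pvCount [] last q = 0 := rfl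

lemma pvCount_cons {α : Type} [DecidableEq α] (p : α) (rest : List α) (last : Option α) (q : α) :
    pvCount (p :: rest) last q
      = if last = some p then pvCount rest none q
        else (if p = q then 1 else 0) + pvCount rest (some p) q := rfl

lemma pvQ_cons {α : Type} [BEq α] [LawfulBEq α] (p : α) (rest : List α) :
    pvQ (p :: rest) = ((rest.drop 1).contains p || pvQ rest) := rfl

lemma pvCount_pos_mem {α : Type} [DecidableEq α] :
    ∀ (ps : List α) (last : Option α) (q : α), 1 ≤ pvCount ps last q → q ∈ ps := by
  intro ps
  induction ps with
  | nil => intro last q h; simp [pvCount] at h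
  | cons p rest ih =>
    intro last q h
    by_cases hl : last = some p
    · simp only [pvCount, if_pos hl] at h
      exact List.mem_cons_of_mem _ (ih none q h)
    · simp only [pvCount, if_neg hl] at h
      by_cases hpq : p = q
      · simp [hpq]
      · simp only [if_neg hpq, Nat.zero_add] at h
        exact List.mem_cons_of_mem _ (ih (some p) q h)

lemma pvCount_pos_of_mem {α : Type} [DecidableEq α] :
    ∀ (ps : List α) (last : Option α) (q : α), last ≠ some q → q ∈ ps → 1 ≤ pvCount ps last q := by
  intro ps
  induction ps with
  | nil => intro last q _ h; simp at h
  | cons p rest ih =>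
    intro last q hne h
    by_cases hl : last = some p
    · have hpq : p ≠ q := by rintro rfl; exact hne hl
      have : q ∈ rest := by
        rcases List.mem_cons.mp h with h' | h'
        · exact absurd h'.symm hpq
        · exact h'
      simp only [pvCount, if_pos hl]
      exact ih none q (by simp) this
    · simp only [pvCount, if_neg hl]
      by_cases hpq : p = q
      · simp [hpq]
      · have : q ∈ rest := by
          rcases List.mem_cons.mp h with h' | h'
          · exact absurd h'.symm hpq
          · exact h'
        have := ih (some p) q (by simpa using hpq) this
        omega

lemma pvCount_some_ne {α : Type} [DecidableEq α] :
    ∀ (ps : List α) (p q : α), p ≠ q → pvCount ps (some p) q = pvCount ps none q := by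
  intro ps
  induction ps with
  | nil => intro p q _; rfl
  | cons z rest ih =>
    intro p q hpq
    by_cases hz : z = p
    · subst hz
      simp only [pvCount, if_neg (by simp : ¬ (none : Option _) = some z),
        if_neg hpq, Nat.zero_add]
      exact (ih z q hpq).symm
    · have h1 : ¬ (some p = some z) := by simpa using fun h => hz h.symm
      have h2 : ¬ ((none : Option _) = some z) := by simp
      simp only [pvCount, if_neg h1, if_neg h2]

lemma pvCount_two_pvQ {α : Type} [BEq α] [LawfulBEq α] [DecidableEq α] :
    ∀ (ps : List α) (last : Option α) (q : α), 2 ≤ pvCount ps last q → pvQ ps = true := by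
  intro ps
  induction ps with
  | nil => intro last q h; simp [pvCount_nil] at h
  | cons p rest ih =>
    intro last q h
    rw [pvCount_cons] at h
    by_cases hl : last = some p
    · rw [if_pos hl] at h
      rw [pvQ_cons, ih none q h, Bool.or_true]
    · rw [if_neg hl] at h
      by_cases hpq : p = q
      · subst hpq
        rw [if_pos rfl] at h
        have h1 : 1 ≤ pvCount rest (some p) p := by omega
        have hmem : p ∈ rest.drop 1 := by
          cases rest with
          | nil => simp [pvCount_nil] at h1
          | cons r0 r' =>
            rw [pvCount_cons] at h1
            by_cases hr : (some p : Option α) = some r0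
            · rw [if_pos hr] at h1
              simpa using pvCount_pos_mem r' none p h1
            · rw [if_neg hr] at h1
              have hr0 : ¬ r0 = p := fun hh => hr (congrArg some hh.symm)
              rw [if_neg hr0] at h1
              simpa using pvCount_pos_mem r' (some r0) p (by omega)
            
        rw [pvQ_cons]
        have hmem' : p ∈ rest.tail := by rwa [List.drop_one] at hmem
        simp [hmem']
      · rw [if_neg hpq] at h
        rw [pvQ_cons, ih (some p) q (by omega), Bool.or_true]

lemma pvQ_pvCount_two {α : Type} [BEq α] [LawfulBEq α] [DecidableEq α] :
    ∀ (ps : List α), pvQ ps = true → ∃ q, 2 ≤ pvCount ps none q := by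
  intro ps
  induction ps with
  | nil => intro h; simp [pvQ] at h
  | cons p rest ih =>
    intro h
    rw [pvQ_cons, Bool.or_eq_true] at h
    have hnp : ∀ z : α, ¬ (none : Option α) = some z := by simp
    rcases h with h | h
    · have hmem : p ∈ rest.drop 1 := by simpa using h
      refine ⟨p, ?_⟩
      cases rest with
      | nil => simp at hmem
      | cons r0 r' =>
        simp only [List.drop_succ_cons, List.drop_zero] at hmem
        have h1 : 1 ≤ pvCount (r0 :: r') (some p) p := by
          rw [pvCount_cons]
          by_cases hr : (some p : Option α) = some r0
          · rw [if_pos hr]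
            exact pvCount_pos_of_mem r' none p (hnp p) hmem
          · rw [if_neg hr]
            have := pvCount_pos_of_mem r' (some r0) p
              (by simpa using fun hh => hr (congrArg some hh.symm)) hmem
            omega
        rw [pvCount_cons, if_neg (hnp p), if_pos rfl]
        omega
    · obtain ⟨q, hq⟩ := ih h
      cases rest with
      | nil => simp [pvCount_nil] at hq
      | cons y r' =>
        rw [pvCount_cons, if_neg (hnp y)] at hq
        by_cases hyp : y = p
        · subst hyp
          by_cases hpq : y = q
          · subst hpq
            rw [if_pos rfl] at hq
            have h1 : 1 ≤ pvCount r' (some y) y := by omega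
            have hmem := pvCount_pos_mem r' (some y) y h1
            refine ⟨y, ?_⟩
            rw [pvCount_cons, if_neg (hnp y), if_pos rfl, pvCount_cons, if_pos rfl]
            have := pvCount_pos_of_mem r' none y (hnp y) hmem
            omega
          · rw [if_neg hpq] at hq
            have h2 : 2 ≤ pvCount r' none q := by
              rw [← pvCount_some_ne r' y q hpq]; omega
            refine ⟨q, ?_⟩
            rw [pvCount_cons, if_neg (hnp y), if_neg hpq, pvCount_cons, if_pos rfl]
            omega
        · refine ⟨q, ?_⟩
          have hne : ¬ ((some p : Option α) = some y) := by
            simpa using fun hh => hyp hh.symm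
          rw [pvCount_cons, if_neg (hnp p), pvCount_cons, if_neg hne]
          omega

lemma pvLoopA_getD :
    ∀ (ps : List (Char × Char)) (d : PySem.Dict (Char × Char) Int) (last : Option (Char × Char)) (q : Char × Char),
      (pvLoopA ps d last).getD q 0 = d.getD q 0 + (pvCount ps last q : Int) := by
  intro ps
  induction ps with
  | nil => intro d last q; simp [pvLoopA, pvCount]
  | cons p rest ih =>
    intro d last q
    by_cases hl : last = some p
    · simp only [pvLoopA, if_pos hl, pvCount, ih]
    · simp only [pvLoopA, if_neg hl, pvCount, ih]
      rw [PySem.Dict.getD_insert]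
      by_cases hqp : q = p
      · subst hqp; simp; ring
      · have : ¬ p = q := fun h => hqp h.symm
        simp [hqp, this]

lemma pvLoopA_nodup :
    ∀ (ps : List (Char × Char)) (d : PySem.Dict (Char × Char) Int) (last : Option (Char × Char)),
      d.keys.Nodup → (pvLoopA ps d last).keys.Nodup := by
  intro ps
  induction ps with
  | nil => intro d last h; simpa [pvLoopA] using h
  | cons p rest ih =>
    intro d last h
    by_cases hl : last = some p
    · simp only [pvLoopA, if_pos hl]; exact ih _ _ h
    · simp only [pvLoopA, if_neg hl]
      exact ih _ _ (PySem.Dict.nodup_keys_insert _ _ _ h)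

lemma pv_any_values (d : PySem.Dict (Char × Char) Int) (hnd : d.keys.Nodup) :
    (d.values.any (fun v => 1 < v)) = true ↔ ∃ q, 1 < d.getD q 0 := by
  rw [List.any_eq_true]
  constructor
  · rintro ⟨v, hv, h1⟩
    have hv' : v ∈ d.items.map (·.2) := by simpa [PySem.Dict.values] using hv
    obtain ⟨⟨k, w⟩, hpr, hw⟩ := List.mem_map.mp hv'
    refine ⟨k, ?_⟩
    have hget := PySem.Dict.get?_of_mem_items d hpr hnd
    rw [PySem.Dict.getD_of_get?_eq_some d 0 hget]
    have h1' : 1 < v := by simpa using h1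
    simp only at hw
    omega
  · rintro ⟨q, hq⟩
    rcases h : d.get? q with _ | v
    · rw [PySem.Dict.getD_of_get?_eq_none d 0 h] at hq; omega
    · rw [PySem.Dict.getD_of_get?_eq_some d 0 h] at hq
      have hitem := PySem.Dict.mem_items_of_get?_eq_some d h
      have hval : v ∈ d.values := by
        show v ∈ d.items.map (·.2)
        exact List.mem_map.mpr ⟨(q, v), hitem, rfl⟩
      exact ⟨v, hval, by simpa using hq⟩

lemma pvQ_pairs_goB : ∀ (l : List Char), pvQ (l.zip l.tail) = pvGoB l := by
  intro l
  induction l with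
  | nil => rfl
  | cons x rest ih =>
    cases rest with
    | nil => rfl
    | cons y r =>
      have h1 : (x :: y :: r).zip (x :: y :: r).tail = (x, y) :: ((y :: r).zip (y :: r).tail) := by
        simp [List.zip]
      have h2 : ((y :: r).zip (y :: r).tail).drop 1 = r.zip r.tail := by
        cases r with
        | nil => rfl
        | cons z r2 => rfl
      rw [h1, pvQ_cons, h2, ih, pvGoB]

-- ===== VERDICT (by name: the statement is the Claim_ definition above) =====
theorem has_non_overlapping_pairs_spec : Claim_equal_has_non_overlapping_pairs := by
  intro s _
  unfold Spec_has_non_overlapping_pairs has_non_overlapping_pairs has_non_overlapping_pairs_alt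
  rw [PySem.List.slice_from_one, ← pvQ_pairs_goB]
  rw [Bool.eq_iff_iff, pv_any_values _ (pvLoopA_nodup _ _ _ (by simp [PySem.Dict.keys_empty]))]
  constructor
  · rintro ⟨q, hq⟩
    rw [pvLoopA_getD] at hq
    simp [PySem.Dict.getD_empty] at hq
    exact pvCount_two_pvQ _ none q (by omega)
  · intro h
    obtain ⟨q, hq⟩ := pvQ_pvCount_two _ h
    exact ⟨q, by rw [pvLoopA_getD]; simp [PySem.Dict.getD_empty]; omega⟩
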